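-- pv_equiv track=rewrite | github.com/AqsaMakhdoomi/Eco-friendly-route-recommendation-system | Routing.py | rep_elem
-- ===== SOURCE A (Python) =====
-- def rep_elem(pathh):
--     len_back = [0]
--     cou = 0
--     for i in pathh:
--         if i != '/':
--             cou = cou + 1
--         else:
--             len_back.append(cou + 1)
--             cou = 0
--     return len_back
-- ===== SOURCE B (Python) =====
-- def rep_elem(pathh):
--     parts = pathh.split('/')
--     return [0] + [len(p) + 1 for p in parts[:-1]]
-- ===== Notes on version B (the rewrite author's own statement) =====
-- stated objective: simpler
-- what changed: Replaces the character-by-character counter loop (with manual reset on the separator) by splitting the string on the separator once and mapping len(p)+1 over every segment except the last.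
import Mathlib
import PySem

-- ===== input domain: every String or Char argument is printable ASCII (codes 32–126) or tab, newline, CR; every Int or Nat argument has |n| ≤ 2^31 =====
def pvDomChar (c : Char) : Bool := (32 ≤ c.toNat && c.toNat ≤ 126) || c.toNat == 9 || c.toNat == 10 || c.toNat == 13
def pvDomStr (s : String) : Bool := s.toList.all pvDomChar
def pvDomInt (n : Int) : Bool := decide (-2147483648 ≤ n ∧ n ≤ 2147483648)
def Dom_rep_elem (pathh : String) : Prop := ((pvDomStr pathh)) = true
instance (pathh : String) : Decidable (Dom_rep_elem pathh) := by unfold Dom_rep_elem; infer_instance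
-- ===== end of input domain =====

-- B replaces A's character-by-character counter loop by split('/') then mapping len+1 over all but the last segment (simpler decomposition; same cost).


-- ===== PORT A =====
-- A's for-loop over the characters, carrying the growing list and the counter
def repLoopA : List Char → List Int → Int → List Int
  | [], len_back, _ => len_back
  | i :: rest, len_back, cou =>
      if i ≠ '/' then repLoopA rest len_back (cou + 1)
      else repLoopA rest (len_back ++ [cou + 1]) 0

def rep_elem (pathh : String) : List Int := repLoopA pathh.toList [0] 0

-- ===== PORT B =====
def rep_elem_alt (pathh : String) : List Int :=
  let parts := pathh.toList.splitOn '/'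
  0 :: parts.dropLast.map (fun p => (p.length : Int) + 1)

-- ===== PRECONDITION & SPEC =====
def Spec_rep_elem (pathh : String) (out : List Int) : Prop := out = rep_elem_alt pathh
instance (pathh : String) (out : List Int) : Decidable (Spec_rep_elem pathh out) := by unfold Spec_rep_elem; infer_instance

-- ===== CLAIM (what is proved, stated in full; the proofs are below) =====
def Claim_equal_rep_elem : Prop := ∀ (pathh : String), Dom_rep_elem pathh → Spec_rep_elem pathh (rep_elem pathh)

-- ===== LEMMAS AND PROOFS =====

-- the suffix A's loop appends, expressed on the split segments: first segment gets the pending count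
def segLens (cou : Int) : List (List Char) → List Int
  | [] => []
  | [_] => []
  | s :: rest => (cou + s.length + 1) :: segLens 0 rest

lemma segLens_cons (cou : Int) (s : List Char) (rest : List (List Char)) (h : rest ≠ []) :
    segLens cou (s :: rest) = (cou + s.length + 1) :: segLens 0 rest := by
  cases rest with
  | nil => exact absurd rfl h
  | cons t ts => rfl

lemma repLoopA_eq_segLens (cs : List Char) :
    ∀ (acc : List Int) (cou : Int),
      repLoopA cs acc cou = acc ++ segLens cou (cs.splitOnP (· == '/')) := by
  induction cs with
  | nil => intro acc cou; simp [repLoopA, List.splitOnP_nil, segLens]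
  | cons c rest ih =>
    intro acc cou
    have hne : rest.splitOnP (· == '/') ≠ [] := List.splitOnP_ne_nil _ rest
    by_cases hc : c = '/'
    · subst hc
      rw [repLoopA, if_neg (by simp), ih, List.splitOnP_cons]
      simp only [beq_self_eq_true, if_true]
      rw [segLens_cons _ _ _ hne]
      simp [List.append_assoc]
    · rw [repLoopA, if_pos (by simpa using hc), ih, List.splitOnP_cons]
      have : ((c == '/') = true) = False := by simp [hc]
      rw [if_neg (by simpa using hc)]
      obtain ⟨s, rs, hs⟩ := List.exists_cons_of_ne_nil hne
      rw [hs, List.modifyHead_cons]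
      by_cases hrs : rs = []
      · subst hrs; rfl
      · rw [segLens_cons _ _ _ hrs, segLens_cons _ _ _ hrs]
        simp; ring_nf

lemma segLens_zero (parts : List (List Char)) :
    segLens 0 parts = parts.dropLast.map (fun p => (p.length : Int) + 1) := by
  induction parts with
  | nil => rfl
  | cons s rest ih =>
    cases rest with
    | nil => rfl
    | cons t ts =>
      rw [segLens_cons _ _ _ (by simp), ih, List.dropLast_cons₂, List.map_cons]
      simp

-- ===== VERDICT (by name: the statement is the Claim_ definition above) =====
theorem rep_elem_spec : Claim_equal_rep_elem := by
  intro pathh _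
  unfold Spec_rep_elem rep_elem rep_elem_alt
  rw [repLoopA_eq_segLens, List.splitOn]
  rw [segLens_zero]
  rfl
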